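-- pv_equiv track=rewrite | github.com/ShreyasCkp/FinalPinnacle_1 | admission/views.py | match_fee_name
-- ===== SOURCE A (Python) =====
-- def match_fee_name(name):
--     name = name.strip().lower().replace(" ", "")
--     if any(prefix in name for prefix in ["tution", "tuition"]):
--         return "tuition_fee"
--     elif "application" in name:
--         return "application_fee"
--     elif "books" in name:
--         return "books_fee"
--     elif "uniform" in name:
--         return "uniform_fee"
--     elif "transport" in name:
--         return "transport_fees"
--     return None
-- ===== SOURCE B (Python) =====
-- # B: single left-to-right scan of the normalized string; at each position mark which
-- # keyword starts there and keep the smallest rule index seen; return its label.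
-- KEYWORDS = [("tution", 0), ("tuition", 0), ("application", 1),
--             ("books", 2), ("uniform", 3), ("transport", 4)]
-- LABELS = ["tuition_fee", "application_fee", "books_fee", "uniform_fee", "transport_fees"]
--
-- def match_fee_name(name):
--     s = name.strip().lower().replace(" ", "")
--     best = None
--     for i in range(len(s)):
--         for kw, idx in KEYWORDS:
--             if s.startswith(kw, i) and (best is None or idx < best):
--                 best = idx
--     return None if best is None else LABELS[best]
-- ===== Notes on version B (the rewrite author's own statement) =====
-- stated objective: alternative
-- what changed: Instead of testing each keyword against the whole string with an if/elif chain of substring checks, B makes a single left-to-right scan over the normalized string, marking at each position which keyword starts there and keeping the smallest rule index seen, then maps that index to its label.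
import Mathlib
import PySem

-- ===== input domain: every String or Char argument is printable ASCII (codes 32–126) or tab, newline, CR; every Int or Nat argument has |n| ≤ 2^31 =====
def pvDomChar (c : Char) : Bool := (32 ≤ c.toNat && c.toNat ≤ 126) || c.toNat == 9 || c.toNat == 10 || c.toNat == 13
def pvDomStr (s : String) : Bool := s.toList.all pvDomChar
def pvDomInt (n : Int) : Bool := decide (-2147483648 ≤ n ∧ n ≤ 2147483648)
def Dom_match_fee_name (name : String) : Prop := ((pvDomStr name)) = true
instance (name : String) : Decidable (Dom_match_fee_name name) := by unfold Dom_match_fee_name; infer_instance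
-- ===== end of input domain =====

-- B replaces A's if/elif substring chain by a single left-to-right scan of the string that
-- marks which keyword starts at each position and keeps the smallest rule index (alternative).


-- ===== PORT A =====
def match_fee_name (name : String) : Option String :=
  let n := PySem.Str.replace (PySem.Str.lower (PySem.Str.strip name)) " " ""
  if ["tution", "tuition"].any (fun p => PySem.Str.isIn p n) then some "tuition_fee"
  else if PySem.Str.isIn "application" n then some "application_fee"
  else if PySem.Str.isIn "books" n then some "books_fee"
  else if PySem.Str.isIn "uniform" n then some "uniform_fee"
  else if PySem.Str.isIn "transport" n then some "transport_fees"
  else none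

-- ===== PORT B =====
def pvKeywords : List (List Char × Nat) :=
  [("tution".toList, 0), ("tuition".toList, 0), ("application".toList, 1),
   ("books".toList, 2), ("uniform".toList, 3), ("transport".toList, 4)]

def pvLabels : List String :=
  ["tuition_fee", "application_fee", "books_fee", "uniform_fee", "transport_fees"]

-- the scan loop of Source B: best rule index starting anywhere in s, updated position by position
def pvBest (s : List Char) : Option Nat :=
  (List.range s.length).foldl (fun b i =>
    pvKeywords.foldl (fun b' kw =>
      if PySem.Chars.startswith (s.drop i) kw.1 then
        match b' with
        | none => some kw.2
        | some m => if kw.2 < m then some kw.2 else some m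
      else b') b) none

def match_fee_name_alt (name : String) : Option String :=
  let s := (PySem.Str.replace (PySem.Str.lower (PySem.Str.strip name)) " " "").toList
  (pvBest s).bind (fun k => PySem.List.pyGet? pvLabels (k : Int))

-- ===== PRECONDITION & SPEC =====
def Spec_match_fee_name (name : String) (out : Option String) : Prop := out = match_fee_name_alt name
instance (name : String) (out : Option String) : Decidable (Spec_match_fee_name name out) := by unfold Spec_match_fee_name; infer_instance

-- ===== CLAIM (what is proved, stated in full; the proofs are below) =====
def Claim_equal_match_fee_name : Prop := ∀ (name : String), Dom_match_fee_name name → Spec_match_fee_name name (match_fee_name name)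

-- ===== LEMMAS AND PROOFS =====

-- rule indices that occur, in scan order
def occList (s : List Char) : List Nat :=
  (List.range s.length).flatMap (fun i =>
    (pvKeywords.filter (fun kw => PySem.Chars.startswith (s.drop i) kw.1)).map (·.2))

def minUpd (b : Option Nat) (v : Nat) : Option Nat :=
  match b with
  | none => some v
  | some m => if v < m then some v else some m

lemma minUpd_some (l : List Nat) (m : Nat) : l.foldl minUpd (some m) = some (l.foldl min m) := by
  induction l generalizing m with
  | nil => rfl
  | cons x xs ih =>
      simp only [List.foldl_cons, minUpd]
      rcases Nat.lt_or_ge x m with h | h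
      · rw [if_pos h, ih, Nat.min_def, if_neg (by omega)]
      · rw [if_neg (by omega), ih, Nat.min_def, if_pos h]

lemma minUpd_none (l : List Nat) : l.foldl minUpd none = l.min? := by
  cases l with
  | nil => rfl
  | cons x xs =>
      calc (x :: xs).foldl minUpd none = xs.foldl minUpd (some x) := rfl
        _ = some (xs.foldl min x) := minUpd_some xs x
        _ = (x :: xs).min? := List.min?_cons'.symm

lemma inner_fold (s : List Char) (i : Nat) (ks : List (List Char × Nat)) (b : Option Nat) :
    ks.foldl (fun b' kw =>
      if PySem.Chars.startswith (s.drop i) kw.1 then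
        match b' with
        | none => some kw.2
        | some m => if kw.2 < m then some kw.2 else some m
      else b') b
    = ((ks.filter (fun kw => PySem.Chars.startswith (s.drop i) kw.1)).map (·.2)).foldl minUpd b := by
  induction ks generalizing b with
  | nil => rfl
  | cons kw ks ih =>
      by_cases h : PySem.Chars.startswith (s.drop i) kw.1
      · simp [h, ih, minUpd]
      · simp [h, ih]

lemma outer_fold (s : List Char) (is : List Nat) (b : Option Nat) :
    is.foldl (fun b i =>
      pvKeywords.foldl (fun b' kw =>
        if PySem.Chars.startswith (s.drop i) kw.1 then
          match b' with
          | none => some kw.2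
          | some m => if kw.2 < m then some kw.2 else some m
        else b') b) b
    = (is.flatMap (fun i =>
        (pvKeywords.filter (fun kw => PySem.Chars.startswith (s.drop i) kw.1)).map (·.2))).foldl minUpd b := by
  induction is generalizing b with
  | nil => rfl
  | cons i is ih =>
      simp only [List.foldl_cons, List.flatMap_cons, List.foldl_append]
      rw [inner_fold, ih]

lemma pvBest_eq_min (s : List Char) : pvBest s = (occList s).min? := by
  unfold pvBest occList
  rw [outer_fold, minUpd_none]

lemma occ_iff (s kw : List Char) (hkw : kw ≠ []) :
    (∃ i, i < s.length ∧ PySem.Chars.startswith (s.drop i) kw = true) ↔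
      PySem.Chars.isIn kw s = true := by
  rw [← PySem.Chars.exists_prefix_drop_iff_isIn]
  constructor
  · rintro ⟨i, _, h⟩; exact ⟨i, (PySem.Chars.startswith_iff _ _).1 h⟩
  · rintro ⟨j, h⟩
    have hj : j < s.length := by
      by_contra hge
      have : s.drop j = [] := List.drop_eq_nil_of_le (by omega)
      rw [this] at h
      exact hkw (List.prefix_nil.mp h)
    exact ⟨j, hj, (PySem.Chars.startswith_iff _ _).2 h⟩

lemma mem_occList (s : List Char) (k : Nat) :
    k ∈ occList s ↔ ∃ kw ∈ pvKeywords, kw.2 = k ∧ PySem.Chars.isIn kw.1 s = true := by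
  have hne : ∀ kw ∈ pvKeywords, kw.1 ≠ ([] : List Char) := by decide
  simp only [occList, List.mem_flatMap, List.mem_map, List.mem_filter, List.mem_range]
  constructor
  · rintro ⟨i, hi, kw, ⟨hmem, hhit⟩, hk⟩
    exact ⟨kw, hmem, hk, (occ_iff s kw.1 (hne kw hmem)).1 ⟨i, hi, hhit⟩⟩
  · rintro ⟨kw, hmem, hk, hin⟩
    obtain ⟨i, hi, hhit⟩ := (occ_iff s kw.1 (hne kw hmem)).2 hin
    exact ⟨i, hi, kw, ⟨hmem, hhit⟩, hk⟩

-- membership unpacked into the six concrete keywords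
lemma mem_occList' (s : List Char) (k : Nat) :
    k ∈ occList s ↔
      (k = 0 ∧ (PySem.Chars.isIn "tution".toList s = true ∨ PySem.Chars.isIn "tuition".toList s = true)) ∨
      (k = 1 ∧ PySem.Chars.isIn "application".toList s = true) ∨
      (k = 2 ∧ PySem.Chars.isIn "books".toList s = true) ∨
      (k = 3 ∧ PySem.Chars.isIn "uniform".toList s = true) ∨
      (k = 4 ∧ PySem.Chars.isIn "transport".toList s = true) := by
  rw [mem_occList]
  simp only [pvKeywords, List.mem_cons, List.not_mem_nil, or_false]
  constructor
  · rintro ⟨kw, hmem, hk, hin⟩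
    rcases hmem with h | h | h | h | h | h <;> subst h
    · exact Or.inl ⟨hk.symm, Or.inl hin⟩
    · exact Or.inl ⟨hk.symm, Or.inr hin⟩
    · exact Or.inr (Or.inl ⟨hk.symm, hin⟩)
    · exact Or.inr (Or.inr (Or.inl ⟨hk.symm, hin⟩))
    · exact Or.inr (Or.inr (Or.inr (Or.inl ⟨hk.symm, hin⟩)))
    · exact Or.inr (Or.inr (Or.inr (Or.inr ⟨hk.symm, hin⟩)))
  · rintro (⟨hk, h | h⟩ | ⟨hk, h⟩ | ⟨hk, h⟩ | ⟨hk, h⟩ | ⟨hk, h⟩) <;> subst hk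
    · exact ⟨_, Or.inl rfl, rfl, h⟩
    · exact ⟨_, Or.inr (Or.inl rfl), rfl, h⟩
    · exact ⟨_, Or.inr (Or.inr (Or.inl rfl)), rfl, h⟩
    · exact ⟨_, Or.inr (Or.inr (Or.inr (Or.inl rfl))), rfl, h⟩
    · exact ⟨_, Or.inr (Or.inr (Or.inr (Or.inr (Or.inl rfl)))), rfl, h⟩
    · exact ⟨_, Or.inr (Or.inr (Or.inr (Or.inr (Or.inr rfl)))), rfl, h⟩

lemma min?_eq_some_of (l : List Nat) (k : Nat) (hmem : k ∈ l) (hle : ∀ x ∈ l, k ≤ x) :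
    l.min? = some k :=
  List.min?_eq_some_iff.2 ⟨hmem, hle⟩

lemma main_aux (s : List Char) :
    (if (PySem.Chars.isIn "tution".toList s || PySem.Chars.isIn "tuition".toList s) = true then some "tuition_fee"
     else if PySem.Chars.isIn "application".toList s = true then some "application_fee"
     else if PySem.Chars.isIn "books".toList s = true then some "books_fee"
     else if PySem.Chars.isIn "uniform".toList s = true then some "uniform_fee"
     else if PySem.Chars.isIn "transport".toList s = true then some "transport_fees"
     else none)
    = ((occList s).min?).bind (fun k => PySem.List.pyGet? pvLabels (k : Int)) := by
  by_cases h0 : PySem.Chars.isIn "tution".toList s = true ∨ PySem.Chars.isIn "tuition".toList s = true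
  · have e0 : (PySem.Chars.isIn "tution".toList s || PySem.Chars.isIn "tuition".toList s) = true := by
      rcases h0 with h | h
      · rw [h, Bool.true_or]
      · rw [h, Bool.or_true]
    rw [if_pos e0,
      min?_eq_some_of (occList s) 0 ((mem_occList' s 0).2 (Or.inl ⟨rfl, h0⟩)) (fun x _ => Nat.zero_le x)]
    rfl
  · rw [not_or] at h0
    have a0 : PySem.Chars.isIn "tution".toList s = false := Bool.eq_false_iff.mpr h0.1
    have b0 : PySem.Chars.isIn "tuition".toList s = false := Bool.eq_false_iff.mpr h0.2
    rw [a0, b0, Bool.or_self, if_neg (by decide)]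
    by_cases h1 : PySem.Chars.isIn "application".toList s = true
    · have hmin : ∀ x ∈ occList s, 1 ≤ x := by
        intro x hx
        rcases (mem_occList' s x).1 hx with ⟨hk, h | h⟩ | ⟨hk, h⟩ | ⟨hk, h⟩ | ⟨hk, h⟩ | ⟨hk, h⟩ <;>
          first
          | (rw [a0] at h; exact absurd h (by decide))
          | (rw [b0] at h; exact absurd h (by decide))
          | omega
      rw [if_pos h1,
        min?_eq_some_of (occList s) 1 ((mem_occList' s 1).2 (Or.inr (Or.inl ⟨rfl, h1⟩))) hmin]
      rfl
    · have a1 : PySem.Chars.isIn "application".toList s = false := Bool.eq_false_iff.mpr h1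
      rw [if_neg h1]
      by_cases h2 : PySem.Chars.isIn "books".toList s = true
      · have hmin : ∀ x ∈ occList s, 2 ≤ x := by
          intro x hx
          rcases (mem_occList' s x).1 hx with ⟨hk, h | h⟩ | ⟨hk, h⟩ | ⟨hk, h⟩ | ⟨hk, h⟩ | ⟨hk, h⟩ <;>
            first
            | (rw [a0] at h; exact absurd h (by decide))
            | (rw [b0] at h; exact absurd h (by decide))
            | (rw [a1] at h; exact absurd h (by decide))
            | omega
        rw [if_pos h2,
          min?_eq_some_of (occList s) 2 ((mem_occList' s 2).2 (Or.inr (Or.inr (Or.inl ⟨rfl, h2⟩)))) hmin]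
        rfl
      · have a2 : PySem.Chars.isIn "books".toList s = false := Bool.eq_false_iff.mpr h2
        rw [if_neg h2]
        by_cases h3 : PySem.Chars.isIn "uniform".toList s = true
        · have hmin : ∀ x ∈ occList s, 3 ≤ x := by
            intro x hx
            rcases (mem_occList' s x).1 hx with ⟨hk, h | h⟩ | ⟨hk, h⟩ | ⟨hk, h⟩ | ⟨hk, h⟩ | ⟨hk, h⟩ <;>
              first
              | (rw [a0] at h; exact absurd h (by decide))
              | (rw [b0] at h; exact absurd h (by decide))
              | (rw [a1] at h; exact absurd h (by decide))
              | (rw [a2] at h; exact absurd h (by decide))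
              | omega
          rw [if_pos h3,
            min?_eq_some_of (occList s) 3 ((mem_occList' s 3).2 (Or.inr (Or.inr (Or.inr (Or.inl ⟨rfl, h3⟩))))) hmin]
          rfl
        · have a3 : PySem.Chars.isIn "uniform".toList s = false := Bool.eq_false_iff.mpr h3
          rw [if_neg h3]
          by_cases h4 : PySem.Chars.isIn "transport".toList s = true
          · have hmin : ∀ x ∈ occList s, 4 ≤ x := by
              intro x hx
              rcases (mem_occList' s x).1 hx with ⟨hk, h | h⟩ | ⟨hk, h⟩ | ⟨hk, h⟩ | ⟨hk, h⟩ | ⟨hk, h⟩ <;>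
                first
                | (rw [a0] at h; exact absurd h (by decide))
                | (rw [b0] at h; exact absurd h (by decide))
                | (rw [a1] at h; exact absurd h (by decide))
                | (rw [a2] at h; exact absurd h (by decide))
                | (rw [a3] at h; exact absurd h (by decide))
                | omega
            rw [if_pos h4,
              min?_eq_some_of (occList s) 4 ((mem_occList' s 4).2 (Or.inr (Or.inr (Or.inr (Or.inr ⟨rfl, h4⟩))))) hmin]
            rfl
          · have a4 : PySem.Chars.isIn "transport".toList s = false := Bool.eq_false_iff.mpr h4
            rw [if_neg h4]
            have : (occList s).min? = none := by
              rw [List.min?_eq_none_iff, List.eq_nil_iff_forall_not_mem]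
              intro x hx
              rcases (mem_occList' s x).1 hx with ⟨hk, h | h⟩ | ⟨hk, h⟩ | ⟨hk, h⟩ | ⟨hk, h⟩ | ⟨hk, h⟩ <;>
                first
                | (rw [a0] at h; exact absurd h (by decide))
                | (rw [b0] at h; exact absurd h (by decide))
                | (rw [a1] at h; exact absurd h (by decide))
                | (rw [a2] at h; exact absurd h (by decide))
                | (rw [a3] at h; exact absurd h (by decide))
                | (rw [a4] at h; exact absurd h (by decide))
            rw [this]
            rfl

-- ===== VERDICT (by name: the statement is the Claim_ definition above) =====
theorem match_fee_name_spec : Claim_equal_match_fee_name := by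
  intro name _
  unfold Spec_match_fee_name match_fee_name match_fee_name_alt
  dsimp only
  rw [pvBest_eq_min]
  simp only [List.any_cons, List.any_nil, Bool.or_false, PySem.Str.isIn_eq]
  exact main_aux _
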